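-- pv_equiv track=rewrite | github.com/kunterbunt/dissertation-graph-replication | VTC2022_Deep-Learning-Based-Dynamic-Spectrum-Access/simulator/algorithm/baseline.py | baseline_algorithm
-- ===== SOURCE A (Python) =====
-- def evaluate_pattern(tuple_list, k):
--     for t in tuple_list:
--         if (k % int(t[0])) == int(t[1]):
--             return 0.0
--     return 1.0
--
-- def create_candidate_tuples(d_min, d_max, anchor):
--     candidate_tuples = []
--     for d in range(d_min, d_max+1):
--         candidate_tuples.append((d,anchor))
--     return candidate_tuples
--
-- def baseline_algorithm(obs_vec, d_min, d_max):
--     candidate_tuples = []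
--     for k, obs in enumerate(obs_vec):
--         if k < d_max and obs == 0.0:
--             candidate_tuples += create_candidate_tuples(max(d_min, k+1), d_max, k)
--         if obs == 1.0:
--             candidate_tuples[:] = [t for t in candidate_tuples if evaluate_pattern([t], k) == obs]
--     return candidate_tuples
-- ===== SOURCE B (Python) =====
-- def baseline_algorithm(obs_vec, d_min, d_max):
--     # alive: insertion-ordered dict of candidate tuples (d, anchor) -> None.
--     # On obs==1 at step k only the keys (d, k % d) can die: pop exactly those.
--     alive = {}
--     for k, obs in enumerate(obs_vec):
--         if k < d_max and obs == 0.0: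
--             lo = max(d_min, k + 1)
--             alive.update(dict.fromkeys(zip(range(lo, d_max + 1), [k] * (d_max + 1 - lo))))
--         if obs == 1.0 and alive:
--             for d in range(max(d_min, 1), d_max + 1):
--                 alive.pop((d, k % d), None)
--     return list(alive)
-- ===== Notes on version B (the rewrite author's own statement) =====
-- stated objective: alternative
-- what changed: Instead of rebuilding the whole candidate list by filtering at every observed 1, B keeps the alive candidates in an insertion-ordered dict keyed by (divisor, anchor) and at step k pops only the at most d_max keys (d, k % d) that can die at that step, skipping the step when no candidate is alive; it trades the per-step list rescan for a bounded number of keyed deletions.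
import Mathlib
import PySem

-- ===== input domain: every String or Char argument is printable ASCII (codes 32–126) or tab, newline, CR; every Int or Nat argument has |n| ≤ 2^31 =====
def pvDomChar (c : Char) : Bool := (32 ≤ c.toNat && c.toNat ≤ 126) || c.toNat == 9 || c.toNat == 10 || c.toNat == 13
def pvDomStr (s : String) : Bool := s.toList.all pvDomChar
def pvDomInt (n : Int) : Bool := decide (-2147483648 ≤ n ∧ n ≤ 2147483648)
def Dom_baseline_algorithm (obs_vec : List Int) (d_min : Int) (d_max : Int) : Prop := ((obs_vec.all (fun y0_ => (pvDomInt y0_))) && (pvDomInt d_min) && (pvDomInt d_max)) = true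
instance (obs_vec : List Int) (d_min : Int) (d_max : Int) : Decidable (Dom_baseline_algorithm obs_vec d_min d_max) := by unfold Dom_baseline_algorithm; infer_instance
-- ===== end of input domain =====

-- B keeps the alive candidates in an insertion-ordered dict keyed by (divisor, anchor) and, at each
-- observed 1 at step k, pops the keys (d, k % d) rather than rebuilding the candidate list by a filter.

-- ===== PORT A =====
-- evaluate_pattern returns only the floats 0.0/1.0; they are represented exactly as the Ints 0/1
-- (the caller only compares the result with obs, an Int here, and 0/1 are exact in both types).
def evaluate_pattern (tuple_list : List (Int × Int)) (k : Int) : Int :=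
  match tuple_list with
  | [] => 1
  | t :: rest => if PySem.Int.mod k t.1 = t.2 then 0 else evaluate_pattern rest k

def create_candidate_tuples (d_min : Int) (d_max : Int) (anchor : Int) : List (Int × Int) :=
  (PySem.List.pyRange d_min (d_max + 1) 1).foldl (fun acc d => acc ++ [(d, anchor)]) []

def baseline_algorithm (obs_vec : List Int) (d_min : Int) (d_max : Int) : List (Int × Int) :=
  (PySem.List.enumerate obs_vec 0).foldl
    (fun (ct : List (Int × Int)) (p : Int × Int) =>
      let ct1 := if p.1 < d_max ∧ p.2 = 0 then
          ct ++ create_candidate_tuples (max d_min (p.1 + 1)) d_max p.1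
        else ct
      if p.2 = 1 then ct1.filter (fun t => evaluate_pattern [t] p.1 = p.2) else ct1)
    []

-- ===== PORT B =====
-- Python's dict values are None, ported as (none : Option Int); the values are never observed.
def baseline_algorithm_alt (obs_vec : List Int) (d_min : Int) (d_max : Int) : List (Int × Int) :=
  ((PySem.List.enumerate obs_vec 0).foldl
    (fun (alive : PySem.Dict (Int × Int) (Option Int)) (p : Int × Int) =>
      let a1 := if p.1 < d_max ∧ p.2 = 0 then
          -- alive.update(dict.fromkeys(zip(range(lo, d_max+1), [k]*(d_max+1-lo)))): the zipped
          -- keys are distinct, so dict.fromkeys is that key list paired with None, in order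
          alive.update
            (((PySem.List.pyRange (max d_min (p.1 + 1)) (d_max + 1) 1).zip
                (List.replicate (d_max + 1 - (max d_min (p.1 + 1))).toNat p.1)).map
              (fun q => (q, (none : Option Int))))
        else alive
      if p.2 = 1 ∧ a1.items ≠ [] then
          (PySem.List.pyRange (max d_min 1) (d_max + 1) 1).foldl
            (fun a d => a.erase (d, PySem.Int.mod p.1 d)) a1
        else a1)
    PySem.Dict.empty).keys

-- ===== PRECONDITION & SPEC =====
def Spec_baseline_algorithm (obs_vec : List Int) (d_min : Int) (d_max : Int) (out : List (Int × Int)) : Prop := out = baseline_algorithm_alt obs_vec d_min d_max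
instance (obs_vec : List Int) (d_min : Int) (d_max : Int) (out : List (Int × Int)) : Decidable (Spec_baseline_algorithm obs_vec d_min d_max out) := by unfold Spec_baseline_algorithm; infer_instance

-- ===== CLAIM (what is proved, stated in full; the proofs are below) =====
def Claim_equal_baseline_algorithm : Prop := ∀ (obs_vec : List Int) (d_min : Int) (d_max : Int), Dom_baseline_algorithm obs_vec d_min d_max → Spec_baseline_algorithm obs_vec d_min d_max (baseline_algorithm obs_vec d_min d_max)

-- ===== LEMMAS AND PROOFS =====

-- the loop bodies of the two ports, named for the proofs (definitionally the lambdas above)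
def stepA (d_min d_max : Int) (ct : List (Int × Int)) (p : Int × Int) : List (Int × Int) :=
  let ct1 := if p.1 < d_max ∧ p.2 = 0 then
      ct ++ create_candidate_tuples (max d_min (p.1 + 1)) d_max p.1
    else ct
  if p.2 = 1 then ct1.filter (fun t => evaluate_pattern [t] p.1 = p.2) else ct1

def stepB (d_min d_max : Int) (alive : PySem.Dict (Int × Int) (Option Int)) (p : Int × Int) :
    PySem.Dict (Int × Int) (Option Int) :=
  let a1 := if p.1 < d_max ∧ p.2 = 0 then
      -- alive.update(dict.fromkeys(zip(range(lo, d_max+1), [k]*(d_max+1-lo)))): the zipped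
      -- keys are distinct, so dict.fromkeys is that key list paired with None, in order
      alive.update
        (((PySem.List.pyRange (max d_min (p.1 + 1)) (d_max + 1) 1).zip
            (List.replicate (d_max + 1 - (max d_min (p.1 + 1))).toNat p.1)).map
          (fun q => (q, (none : Option Int))))
    else alive
  if p.2 = 1 ∧ a1.items ≠ [] then
      (PySem.List.pyRange (max d_min 1) (d_max + 1) 1).foldl
        (fun a d => a.erase (d, PySem.Int.mod p.1 d)) a1
    else a1

lemma foldl_app (a : Int) : ∀ (l : List Int) (acc : List (Int × Int)),
    l.foldl (fun acc d => acc ++ [(d, a)]) acc = acc ++ l.map (fun d => (d, a))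
  | [], acc => by simp
  | d :: l, acc => by simp [List.foldl_cons, foldl_app a l]

lemma create_eq_map (lo hi a : Int) :
    create_candidate_tuples lo hi a
      = (PySem.List.pyRange lo (hi + 1) 1).map (fun d => (d, a)) := by
  unfold create_candidate_tuples
  rw [foldl_app]
  simp

lemma erase_fold_items (m : Int → Int) : ∀ (l : List Int)
    (D : PySem.Dict (Int × Int) (Option Int)),
    (l.foldl (fun a d => a.erase (d, m d)) D).items
      = D.items.filter (fun q => l.all (fun d => !(q.1 == (d, m d))))
  | [], D => by simp
  | d :: l, D => by
    rw [List.foldl_cons, erase_fold_items m l]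
    show (PySem.Dict.erase D (d, m d)).items.filter _ = _
    simp only [PySem.Dict.erase, List.filter_filter, List.all_cons]
    apply List.filter_congr
    intro q _
    rw [Bool.and_comm]

lemma pred_eq (d_min d_max k : Int) (t : Int × Int)
    (h1 : max d_min 1 ≤ t.1) (h2 : t.1 ≤ d_max) :
    ((PySem.List.pyRange (max d_min 1) (d_max + 1) 1).all
        (fun d => !(t == (d, PySem.Int.mod k d))))
      = decide (evaluate_pattern [t] k = 1) := by
  by_cases h : PySem.Int.mod k t.1 = t.2
  · have hall : ((PySem.List.pyRange (max d_min 1) (d_max + 1) 1).all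
        (fun d => !(t == (d, PySem.Int.mod k d)))) = false := by
      rw [List.all_eq_false]
      refine ⟨t.1, ?_, ?_⟩
      · rw [PySem.List.mem_pyRange_one]; omega
      · simp [h]
    rw [hall]
    simp [evaluate_pattern, h]
  · have hall : ((PySem.List.pyRange (max d_min 1) (d_max + 1) 1).all
        (fun d => !(t == (d, PySem.Int.mod k d)))) = true := by
      rw [List.all_eq_true]
      intro d _
      simp only [Bool.not_eq_eq_eq_not, Bool.not_true, beq_eq_false_iff_ne, ne_eq, Prod.ext_iff]
      intro ⟨hd1, hd2⟩
      exact h (by rw [← hd1] at hd2; exact hd2.symm ▸ rfl)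
    rw [hall]
    simp [evaluate_pattern, h]

lemma zip_rep {α β : Type} (a : β) : ∀ (l : List α),
    l.zip (List.replicate l.length a) = l.map (fun x => (x, a))
  | [] => rfl
  | x :: l => by simp [List.replicate_succ, zip_rep a l]

lemma step_rel (d_min d_max k o : Int) (ct : List (Int × Int))
    (D : PySem.Dict (Int × Int) (Option Int)) (hk : 0 ≤ k)
    (hD : D.items = ct.map (fun t => (t, (none : Option Int))))
    (hinv : ∀ t ∈ ct, max d_min 1 ≤ t.1 ∧ t.1 ≤ d_max ∧ t.2 < k) :
    (stepB d_min d_max D (k, o)).items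
        = (stepA d_min d_max ct (k, o)).map (fun t => (t, (none : Option Int)))
      ∧ (∀ t ∈ stepA d_min d_max ct (k, o),
          max d_min 1 ≤ t.1 ∧ t.1 ≤ d_max ∧ t.2 < k + 1) := by
  unfold stepA stepB
  simp only []
  set ct1 := if (k, o).1 < d_max ∧ (k, o).2 = 0 then
      ct ++ create_candidate_tuples (max d_min ((k, o).1 + 1)) d_max (k, o).1
    else ct with hct1
  set a1 := if (k, o).1 < d_max ∧ (k, o).2 = 0 then
      D.update
        (((PySem.List.pyRange (max d_min ((k, o).1 + 1)) (d_max + 1) 1).zip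
            (List.replicate (d_max + 1 - (max d_min ((k, o).1 + 1))).toNat (k, o).1)).map
          (fun q => (q, (none : Option Int))))
    else D with ha1
  have h1 : a1.items = ct1.map (fun t => (t, (none : Option Int))) := by
    rw [hct1, ha1]
    by_cases hc : (k, o).1 < d_max ∧ (k, o).2 = 0
    · simp only [if_pos hc]
      rw [show (d_max + 1 - max d_min (k + 1)).toNat
            = (PySem.List.pyRange (max d_min (k + 1)) (d_max + 1) 1).length from
          (PySem.List.length_pyRange_one _ _).symm,
        zip_rep, List.map_map, PySem.Dict.update, List.foldl_map]
      simp only [Function.comp_def]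
      rw [PySem.Dict.items_foldl_insert_fresh (k := fun d => ((d : Int), k))
            (v := fun _ => (none : Option Int))]
      · rw [hD, create_eq_map, List.map_append, List.map_map]
        rfl
      · intro d _
        rw [← Bool.not_eq_true, PySem.Dict.contains_iff_mem_keys]
        intro hmem
        have hk' : (d, k) ∈ ct := by
          have : D.keys = ct := by
            show D.items.map Prod.fst = ct
            rw [hD, List.map_map]; simp [Function.comp_def]
          rwa [this] at hmem
        have := (hinv _ hk').2.2
        omega
      · refine List.Nodup.map ?_ (PySem.List.nodup_pyRange_one _ _)
        intro a b hab
        exact (Prod.ext_iff.1 hab).1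
    · simp only [if_neg hc]; exact hD
  have hinv1 : ∀ t ∈ ct1, max d_min 1 ≤ t.1 ∧ t.1 ≤ d_max ∧ t.2 < k + 1 := by
    intro t ht
    rw [hct1] at ht
    by_cases hc : (k, o).1 < d_max ∧ (k, o).2 = 0
    · rw [if_pos hc, List.mem_append, create_eq_map] at ht
      rcases ht with ht | ht
      · have := hinv t ht; omega
      · simp only [List.mem_map] at ht
        obtain ⟨d, hd, rfl⟩ := ht
        rw [PySem.List.mem_pyRange_one] at hd
        simp only
        omega
    · rw [if_neg hc] at ht
      have := hinv t ht; omega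
  refine ⟨?_, ?_⟩
  · by_cases ho : (k, o).2 = 1
    · by_cases hne : a1.items = []
      · rw [if_neg (fun hcon => hcon.2 hne), if_pos ho, hne]
        have : ct1 = [] := by
          rw [h1] at hne
          exact List.map_eq_nil_iff.1 hne
        rw [this]
        simp
      · rw [if_pos ⟨ho, hne⟩, if_pos ho]
        rw [erase_fold_items, h1, List.filter_map]
        congr 1
        apply List.filter_congr
        intro t ht
        have hb := hinv1 t ht
        have ho' : o = 1 := ho
        have := pred_eq d_min d_max k t hb.1 hb.2.1
        simpa [ho'] using this
    · rw [if_neg (by simp [ho]), if_neg ho]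
      exact h1
  · by_cases ho : (k, o).2 = 1
    · rw [if_pos ho]
      intro t ht
      exact hinv1 t (List.mem_of_mem_filter ht)
    · rw [if_neg ho]
      exact hinv1

lemma main_inv (d_min d_max : Int) :
    ∀ (obs : List Int) (k : Int) (ct : List (Int × Int))
      (D : PySem.Dict (Int × Int) (Option Int)),
      0 ≤ k →
      D.items = ct.map (fun t => (t, (none : Option Int))) →
      (∀ t ∈ ct, max d_min 1 ≤ t.1 ∧ t.1 ≤ d_max ∧ t.2 < k) →
      ((PySem.List.enumerate obs k).foldl (stepB d_min d_max) D).items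
        = ((PySem.List.enumerate obs k).foldl (stepA d_min d_max) ct).map
            (fun t => (t, (none : Option Int)))
  | [], k, ct, D, hk, hD, hinv => by
    simpa [PySem.List.enumerate] using hD
  | o :: obs, k, ct, D, hk, hD, hinv => by
    rw [PySem.List.enumerate_cons, List.foldl_cons, List.foldl_cons]
    obtain ⟨h1, h2⟩ := step_rel d_min d_max k o ct D hk hD hinv
    exact main_inv d_min d_max obs (k + 1) _ _ (by omega) h1 h2

-- ===== VERDICT (by name: the statement is the Claim_ definition above) =====
theorem baseline_algorithm_spec : Claim_equal_baseline_algorithm := by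
  intro obs d_min d_max _
  show baseline_algorithm obs d_min d_max = baseline_algorithm_alt obs d_min d_max
  have e1 : baseline_algorithm obs d_min d_max
      = (PySem.List.enumerate obs 0).foldl (stepA d_min d_max) [] := rfl
  have e2 : baseline_algorithm_alt obs d_min d_max
      = ((PySem.List.enumerate obs 0).foldl (stepB d_min d_max) PySem.Dict.empty).keys := rfl
  have h := main_inv d_min d_max obs 0 [] PySem.Dict.empty le_rfl rfl (by simp)
  rw [e1, e2]
  show _ = ((PySem.List.enumerate obs 0).foldl (stepB d_min d_max) PySem.Dict.empty).items.map Prod.fst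
  rw [h, List.map_map]
  simp [Function.comp_def]
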